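-- pv_equiv track=rewrite | github.com/Davyalvs/APC-ICC | APC/Projeto_Final_APC.py | informal
-- ===== SOURCE A (Python) =====
-- def informal(X):
--     posicoes = []
--     string = ''
--     for i in range(len(X)):
--         if X[i].isdigit():
--             for c in string:
--                 if c.isalpha():
--                     posicoes.append(i)
--                     break
--         if X[i].isalpha() or X[i].isdigit():
--             string = string + X[i]
--         else:
--             string = ''
--     return posicoes
-- ===== SOURCE B (Python) =====
-- def informal(X):
--     # Partition X into maximal runs of equal "alnum" class, then one pass per
--     # alnum run with a seen-alpha flag (instead of A's per-digit rescan of the run).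
--     runs = []
--     i = 0
--     n = len(X)
--     while i < n:
--         j = i
--         k = X[i].isalpha() or X[i].isdigit()
--         while j < n and (X[j].isalpha() or X[j].isdigit()) == k:
--             j += 1
--         runs.append((i, k, X[i:j]))
--         i = j
--     posicoes = []
--     for start, key, run in runs:
--         if key:
--             seen_alpha = False
--             for off, c in enumerate(run):
--                 if c.isdigit() and seen_alpha:
--                     posicoes.append(start + off)
--                 if c.isalpha():
--                     seen_alpha = True
--     return posicoes
-- ===== Notes on version B (the rewrite author's own statement) =====
-- stated objective: alternative
-- what changed: B first partitions the string into maximal alnum/non-alnum runs with global start offsets, then scans each alnum run once with a seen-alpha flag, instead of A's rescanning the accumulated run prefix for an alpha at every digit.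
import Mathlib
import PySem

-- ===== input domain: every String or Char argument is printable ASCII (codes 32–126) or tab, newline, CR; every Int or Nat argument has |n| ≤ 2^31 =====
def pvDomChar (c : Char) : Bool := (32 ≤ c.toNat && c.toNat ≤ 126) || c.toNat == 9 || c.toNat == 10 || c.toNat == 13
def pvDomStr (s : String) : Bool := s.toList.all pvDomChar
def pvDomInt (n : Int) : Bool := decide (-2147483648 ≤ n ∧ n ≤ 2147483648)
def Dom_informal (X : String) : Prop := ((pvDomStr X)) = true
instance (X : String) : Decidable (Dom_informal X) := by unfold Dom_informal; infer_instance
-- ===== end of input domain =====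

-- B partitions the string into maximal alnum/non-alnum runs first and scans each
-- alnum run once with a seen-alpha flag (objective: alternative decomposition,
-- removing A's per-digit rescan of the accumulated run).

-- ===== PORT A =====
-- the inner 'for c in string: if c.isalpha(): posicoes.append(i); break'
def pvScanBreak (string : List Char) (pos : List Int) (i : Int) : List Int :=
  match string with
  | [] => pos
  | c :: rest => if PySem.Chars.isalpha c then pos ++ [i] else pvScanBreak rest pos i

-- the outer 'for i in range(len(X))' loop, carrying (posicoes, string)
def pvALoop : List Char → Int → List Int → List Char → List Int
  | [], _, pos, _ => pos
  | c :: rest, i, pos, string =>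
    let pos' := if PySem.Chars.isdigit c then pvScanBreak string pos i else pos
    let string' := if PySem.Chars.isalpha c || PySem.Chars.isdigit c then string ++ [c] else []
    pvALoop rest (i + 1) pos' string'

def informal (X : String) : List Int := pvALoop X.toList 0 [] []

-- ===== PORT B =====
-- the inner 'while j < n and (X[j].isalpha() or X[j].isdigit()) == k' scan
def pvTakeRun (k : Bool) : List Char → List Char × List Char
  | [] => ([], [])
  | c :: rest =>
    if (PySem.Chars.isalpha c || PySem.Chars.isdigit c) == k then
      let p := pvTakeRun k rest
      (c :: p.1, p.2)
    else ([], c :: rest)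

theorem pvTakeRun_snd_len (k : Bool) (l : List Char) : (pvTakeRun k l).2.length ≤ l.length := by
  induction l with
  | nil => simp [pvTakeRun]
  | cons c rest ih =>
    simp only [pvTakeRun]
    split
    · exact Nat.le_succ_of_le ih
    · simp

-- the outer 'while i < n' run-building loop, producing (start, key, run) triples
def pvSplitRuns : List Char → Int → List (Int × Bool × List Char)
  | [], _ => []
  | c :: rest, i =>
    let k := PySem.Chars.isalpha c || PySem.Chars.isdigit c
    let p := pvTakeRun k rest
    (i, k, c :: p.1) :: pvSplitRuns p.2 (i + 1 + p.1.length)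
termination_by l _ => l.length
decreasing_by exact Nat.lt_succ_of_le (pvTakeRun_snd_len _ _)

-- 'for off, c in enumerate(run)' with the seen_alpha flag
def pvScanRun : Int → List Char → Bool → List Int
  | _, [], _ => []
  | start, c :: rest, seen =>
    (if PySem.Chars.isdigit c && seen then [start] else []) ++
      pvScanRun (start + 1) rest (seen || PySem.Chars.isalpha c)

def informal_alt (X : String) : List Int :=
  (pvSplitRuns X.toList 0).foldl
    (fun acc t => if t.2.1 then acc ++ pvScanRun t.1 t.2.2 false else acc) []

-- ===== PRECONDITION & SPEC =====
def Spec_informal (X : String) (out : List Int) : Prop := out = informal_alt X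
instance (X : String) (out : List Int) : Decidable (Spec_informal X out) := by unfold Spec_informal; infer_instance

-- ===== CLAIM (what is proved, stated in full; the proofs are below) =====
def Claim_equal_informal : Prop := ∀ (X : String), Dom_informal X → Spec_informal X (informal X)

-- ===== LEMMAS AND PROOFS =====

-- common semantics: emit i when a digit follows an alpha in the current run,
-- reset the seen-alpha flag at a non-alnum character
def pvSem : List Char → Int → Bool → List Int
  | [], _, _ => []
  | c :: rest, i, seen =>
    (if PySem.Chars.isdigit c && seen then [i] else []) ++
      pvSem rest (i + 1)
        (if PySem.Chars.isalpha c || PySem.Chars.isdigit c then seen || PySem.Chars.isalpha c else false)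

def pvSeenAfter : List Char → Bool → Bool
  | [], seen => seen
  | c :: rest, seen =>
    pvSeenAfter rest (if PySem.Chars.isalpha c || PySem.Chars.isdigit c then seen || PySem.Chars.isalpha c else false)

theorem pvScanBreak_eq (s : List Char) (pos : List Int) (i : Int) :
    pvScanBreak s pos i = pos ++ (if s.any PySem.Chars.isalpha then [i] else []) := by
  induction s with
  | nil => simp [pvScanBreak]
  | cons c rest ih =>
    simp only [pvScanBreak, List.any_cons]
    by_cases h : PySem.Chars.isalpha c = true <;> simp [h, ih]

theorem pvALoop_eq (cs : List Char) : ∀ (i : Int) (pos : List Int) (string : List Char),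
    pvALoop cs i pos string = pos ++ pvSem cs i (string.any PySem.Chars.isalpha) := by
  induction cs with
  | nil => intro i pos string; simp [pvALoop, pvSem]
  | cons c rest ih =>
    intro i pos string
    simp only [pvALoop, pvSem, ih, pvScanBreak_eq]
    by_cases hd : PySem.Chars.isdigit c = true <;>
      by_cases ha : PySem.Chars.isalpha c = true <;>
      by_cases hs : string.any PySem.Chars.isalpha = true <;>
      simp [hd, ha, hs, List.append_assoc]

theorem pvSem_append (xs ys : List Char) : ∀ (i : Int) (seen : Bool),
    pvSem (xs ++ ys) i seen =
      pvSem xs i seen ++ pvSem ys (i + (xs.length : Int)) (pvSeenAfter xs seen) := by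
  induction xs with
  | nil => intro i seen; simp [pvSem, pvSeenAfter]
  | cons c rest ih =>
    intro i seen
    simp only [List.cons_append, pvSem, pvSeenAfter, ih, List.append_assoc, List.length_cons]
    have : i + 1 + (rest.length : Int) = i + ((rest.length : Int) + 1) := by ring
    rw [this]
    push_cast
    ring_nf

theorem pvScanRun_eq_pvSem (run : List Char)
    (h : ∀ c ∈ run, (PySem.Chars.isalpha c || PySem.Chars.isdigit c) = true) :
    ∀ (i : Int) (seen : Bool), pvScanRun i run seen = pvSem run i seen := by
  induction run with
  | nil => intro i seen; simp [pvScanRun, pvSem]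
  | cons c rest ih =>
    intro i seen
    have hc := h c (by simp)
    simp only [pvScanRun, pvSem, hc, if_pos]
    rw [ih (fun d hd => h d (by simp [hd]))]

theorem pvSem_nonalnum (run : List Char)
    (h : ∀ c ∈ run, (PySem.Chars.isalpha c || PySem.Chars.isdigit c) = false) :
    ∀ (i : Int) (seen : Bool), pvSem run i seen = [] := by
  induction run with
  | nil => intro i seen; simp [pvSem]
  | cons c rest ih =>
    intro i seen
    have hc := h c (by simp)
    have hd : PySem.Chars.isdigit c = false := by
      cases hdd : PySem.Chars.isdigit c <;> simp_all
    simp only [pvSem, hd]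
    simp [ih (fun d hd => h d (by simp [hd]))]

theorem pvSeenAfter_nonalnum (run : List Char)
    (h : ∀ c ∈ run, (PySem.Chars.isalpha c || PySem.Chars.isdigit c) = false) (hne : run ≠ []) :
    ∀ seen, pvSeenAfter run seen = false := by
  induction run with
  | nil => exact absurd rfl hne
  | cons c rest ih =>
    intro seen
    have hc := h c (by simp)
    simp only [pvSeenAfter, hc, Bool.false_eq_true, if_false]
    cases rest with
    | nil => simp [pvSeenAfter]
    | cons d ds => exact ih (fun e he => h e (by simp [he])) (by simp) false

-- the seen flag is irrelevant when the next run starts with a non-alnum char (or is empty)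
theorem pvSem_reset (s : List Char)
    (h : s = [] ∨ ∃ c rest, s = c :: rest ∧ (PySem.Chars.isalpha c || PySem.Chars.isdigit c) = false)
    (i : Int) (seen : Bool) : pvSem s i seen = pvSem s i false := by
  rcases h with h | ⟨c, rest, rfl, hc⟩
  · subst h; rfl
  · have hd : PySem.Chars.isdigit c = false := by
      cases hdd : PySem.Chars.isdigit c <;> simp_all
    have ha : PySem.Chars.isalpha c = false := by
      cases haa : PySem.Chars.isalpha c <;> simp_all
    simp [pvSem, hd, ha]

theorem pvTakeRun_append (k : Bool) (l : List Char) :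
    (pvTakeRun k l).1 ++ (pvTakeRun k l).2 = l := by
  induction l with
  | nil => simp [pvTakeRun]
  | cons c rest ih =>
    simp only [pvTakeRun]
    split
    · simpa using ih
    · simp

theorem pvTakeRun_all (k : Bool) (l : List Char) :
    ∀ c ∈ (pvTakeRun k l).1, (PySem.Chars.isalpha c || PySem.Chars.isdigit c) = k := by
  induction l with
  | nil => simp [pvTakeRun]
  | cons c rest ih =>
    simp only [pvTakeRun]
    split
    · rename_i h
      intro d hd
      rcases List.mem_cons.mp hd with rfl | hd'
      · exact eq_of_beq h
      · exact ih d hd'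
    · simp

theorem pvTakeRun_snd_head (k : Bool) (l : List Char) :
    (pvTakeRun k l).2 = [] ∨ ∃ c rest, (pvTakeRun k l).2 = c :: rest ∧
      (PySem.Chars.isalpha c || PySem.Chars.isdigit c) = !k := by
  induction l with
  | nil => simp [pvTakeRun]
  | cons c rest ih =>
    simp only [pvTakeRun]
    split
    · exact ih
    · rename_i h
      right
      refine ⟨c, rest, rfl, ?_⟩
      cases hx : (PySem.Chars.isalpha c || PySem.Chars.isdigit c) <;> cases k <;> simp_all

-- pull the accumulator out of B's fold
theorem pvBFold_acc (runs : List (Int × Bool × List Char)) :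
    ∀ acc, runs.foldl (fun acc t => if t.2.1 then acc ++ pvScanRun t.1 t.2.2 false else acc) acc =
      acc ++ runs.foldl (fun acc t => if t.2.1 then acc ++ pvScanRun t.1 t.2.2 false else acc) [] := by
  induction runs with
  | nil => simp
  | cons t rest ih =>
    intro acc
    simp only [List.foldl_cons]
    rw [ih, ih (if t.2.1 then [] ++ pvScanRun t.1 t.2.2 false else [])]
    by_cases h : t.2.1 = true <;> simp [h]

theorem pvSplitRuns_sem : ∀ (n : Nat) (s : List Char), s.length ≤ n → ∀ (i : Int),
    (pvSplitRuns s i).foldl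
      (fun acc t => if t.2.1 then acc ++ pvScanRun t.1 t.2.2 false else acc) [] =
      pvSem s i false := by
  intro n
  induction n with
  | zero =>
    intro s hs i
    have : s = [] := List.eq_nil_of_length_eq_zero (Nat.le_zero.mp hs)
    subst this
    simp [pvSplitRuns, pvSem]
  | succ n ih =>
    intro s hs i
    cases s with
    | nil => simp [pvSplitRuns, pvSem]
    | cons c rest =>
      have hs' : ((pvTakeRun (PySem.Chars.isalpha c || PySem.Chars.isdigit c) rest).2).length ≤ n :=
        le_trans (pvTakeRun_snd_len _ _) (Nat.le_of_succ_le_succ (by simpa using hs))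
      simp only [pvSplitRuns, List.foldl_cons]
      rw [pvBFold_acc, ih _ hs']
      have hresteq : c :: rest =
          (c :: (pvTakeRun (PySem.Chars.isalpha c || PySem.Chars.isdigit c) rest).1) ++
            (pvTakeRun (PySem.Chars.isalpha c || PySem.Chars.isdigit c) rest).2 := by
        rw [List.cons_append, pvTakeRun_append]
      conv_rhs => rw [hresteq]
      rw [pvSem_append]
      have hlen : i + (((c :: (pvTakeRun (PySem.Chars.isalpha c || PySem.Chars.isdigit c) rest).1).length : Nat) : Int) =
          i + 1 + (((pvTakeRun (PySem.Chars.isalpha c || PySem.Chars.isdigit c) rest).1.length : Nat) : Int) := by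
        simp only [List.length_cons]
        push_cast
        ring
      rw [hlen]
      cases hk : (PySem.Chars.isalpha c || PySem.Chars.isdigit c) with
      | true =>
        have hall : ∀ d ∈ c :: (pvTakeRun true rest).1,
            (PySem.Chars.isalpha d || PySem.Chars.isdigit d) = true := by
          intro d hd
          rcases List.mem_cons.mp hd with rfl | hd'
          · exact hk
          · exact pvTakeRun_all true rest d hd'
        have hreset : pvSem (pvTakeRun true rest).2 (i + 1 + ((pvTakeRun true rest).1.length : Int))
            (pvSeenAfter (c :: (pvTakeRun true rest).1) false) =
            pvSem (pvTakeRun true rest).2 (i + 1 + ((pvTakeRun true rest).1.length : Int)) false := by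
          apply pvSem_reset
          rcases pvTakeRun_snd_head true rest with h0 | ⟨d, ds, hds, hd⟩
          · exact Or.inl h0
          · exact Or.inr ⟨d, ds, hds, by simpa using hd⟩
        simp only [if_pos, List.nil_append]
        rw [pvScanRun_eq_pvSem _ hall, hreset]
      | false =>
        have hall : ∀ d ∈ c :: (pvTakeRun false rest).1,
            (PySem.Chars.isalpha d || PySem.Chars.isdigit d) = false := by
          intro d hd
          rcases List.mem_cons.mp hd with rfl | hd'
          · exact hk
          · exact pvTakeRun_all false rest d hd'
        rw [pvSem_nonalnum _ hall, pvSeenAfter_nonalnum _ hall (by simp)]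
        simp

theorem informal_spec_aux (X : String) : informal X = informal_alt X := by
  unfold informal informal_alt
  rw [pvALoop_eq, pvSplitRuns_sem X.toList.length _ (le_refl _)]
  simp

-- ===== VERDICT (by name: the statement is the Claim_ definition above) =====
theorem informal_spec : Claim_equal_informal := by
  intro X _
  unfold Spec_informal
  exact informal_spec_aux X
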